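-- pv_equiv track=rewrite | github.com/waffle87/leetcode | lex_smallest_str_op.py | findLexSmallestString
-- ===== SOURCE A (Python) =====
-- def findLexSmallestString(s, a, b):
--     """
--     :type s: str
--     :type a: int
--     :type b: int
--     :rtype: str
--     """
--     n, ans = len(s), s
--     vis = [False] * n
--     s, i = s + s, 0
--     while not vis[i]:
--         vis[i] = True
--         for j in range(10):
--             lim = 0 if b % 2 == 0 else 9
--             for k in range(lim + 1):
--                 tmp = list(s[i : i + n])
--                 for p in range(1, n, 2):
--                     tmp[p] = str((int(tmp[p]) + j * a) % 10)
--                 for p in range(0, n, 2):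
--                     tmp[p] = str((int(tmp[p]) + k * a) % 10)
--                 tmp_str = "".join(tmp)
--                 if tmp_str < ans:
--                     ans = tmp_str
--         i = (i + b) % n
--     return ans
-- ===== SOURCE B (Python) =====
-- from math import gcd
--
-- def findLexSmallestString(s, a, b):
--     # Closed-form enumeration: reachable rotations start at multiples of gcd(b, n);
--     # reachable digit offsets are the multiples of gcd(a, 10).
--     n = len(s)
--     g = gcd(b, n)
--     d = gcd(a, 10)
--     odds = range(0, 10, d)
--     evens = range(0, 10, d) if b % 2 else (0,)
--     best = None
--     for r in range(0, n, g):
--         base = s[r:] + s[:r]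
--         for o in odds:
--             for e in evens:
--                 cand = ''.join(str((int(c) + (o if p % 2 else e)) % 10)
--                                for p, c in enumerate(base))
--                 if best is None or cand < best:
--                     best = cand
--     return best
-- ===== Notes on version B (the rewrite author's own statement) =====
-- stated objective: alternative
-- what changed: Replaces A's visited-array walk over rotation starts with nested 10x10 digit-shift re-enumeration by a closed-form enumeration: rotation starts are exactly the multiples of gcd(b, n) and reachable digit offsets exactly the multiples of gcd(a, 10), so B builds each candidate once from these ranges and keeps the running minimum.
import Mathlib
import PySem

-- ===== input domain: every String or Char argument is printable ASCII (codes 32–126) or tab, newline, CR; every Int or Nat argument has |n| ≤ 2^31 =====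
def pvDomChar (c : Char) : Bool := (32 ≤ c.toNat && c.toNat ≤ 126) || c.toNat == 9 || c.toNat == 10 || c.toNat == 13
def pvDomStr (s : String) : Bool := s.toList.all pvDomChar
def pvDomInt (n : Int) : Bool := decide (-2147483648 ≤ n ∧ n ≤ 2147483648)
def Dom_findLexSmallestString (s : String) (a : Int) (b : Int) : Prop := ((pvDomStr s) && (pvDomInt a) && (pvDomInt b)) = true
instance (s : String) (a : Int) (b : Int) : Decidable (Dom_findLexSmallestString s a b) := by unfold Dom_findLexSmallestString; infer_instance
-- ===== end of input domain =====

-- B replaces A's visited-array walk with its 10×10 per-rotation re-enumeration by a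
-- closed-form enumeration (rotation starts = multiples of gcd(b,n), digit offsets =
-- multiples of gcd(a,10)); same return value wherever A returns (objective: alternative).

-- ===== PORT A =====
-- termination helper for the while-not-visited loop (cited by decreasing_by)
theorem pvVisDecr (vis : List Bool) (i : Nat)
    (h : PySem.List.pyGetD vis (i : Int) true = false) :
    (vis.set i true).count false < vis.count false := by
  rw [PySem.List.pyGetD_natCast] at h
  have hi : i < vis.length := by
    by_contra hn
    rw [List.getD_eq_getElem?_getD, List.getElem?_eq_none (by omega)] at h
    simp at h
  rw [List.getD_eq_getElem?_getD, List.getElem?_eq_getElem hi] at h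
  simp at h
  have hpos : 0 < vis.count false :=
    List.count_pos_iff.mpr (h ▸ List.getElem_mem hi)
  have heq : (vis.set i true).count false = vis.count false - 1 := by
    rw [List.count_set hi]; simp [h]
  omega

-- tmp = list(s[i:i+n]); the two stride-2 passes; "".join(tmp)
def pvACand (ss : List Char) (n : Nat) (a : Int) (i j k : Int) : String :=
  let tmp : List String := (PySem.List.slice ss (some i) (some (i + (n : Int)))).map (fun c => String.ofList [c])
  let tmp := (PySem.List.pyRange 1 (n : Int) 2).foldl (fun t p =>
      t.set p.toNat (PySem.Int.toStr (PySem.Int.mod ((PySem.Int.ofStr? (PySem.List.pyGetD t p "")).getD 0 + j * a) 10))) tmp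
  let tmp := (PySem.List.pyRange 0 (n : Int) 2).foldl (fun t p =>
      t.set p.toNat (PySem.Int.toStr (PySem.Int.mod ((PySem.Int.ofStr? (PySem.List.pyGetD t p "")).getD 0 + k * a) 10))) tmp
  PySem.Str.join "" tmp

-- while not vis[i]: vis[i] = True; for j in range(10): for k in range(lim+1): ...; i = (i+b) % n
def pvALoop (ss : List Char) (n : Nat) (a b : Int) (vis : List Bool) (i : Nat) (ans : String) : String :=
  if hv : PySem.List.pyGetD vis (i : Int) true = false then
    let vis' := vis.set i true
    let ans' := (PySem.List.pyRange 0 10 1).foldl (fun acc j =>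
        let lim : Int := if PySem.Int.mod b 2 = 0 then 0 else 9
        (PySem.List.pyRange 0 (lim + 1) 1).foldl (fun acc2 k =>
          let tmp_str := pvACand ss n a (i : Int) j k
          if tmp_str < acc2 then tmp_str else acc2) acc) ans
    pvALoop ss n a b vis' (PySem.Int.mod ((i : Int) + b) (n : Int)).toNat ans'
  else ans
termination_by vis.count false
decreasing_by exact pvVisDecr vis i hv

def findLexSmallestString (s : String) (a : Int) (b : Int) : String :=
  let n := s.toList.length
  let vis := List.replicate n false
  let ss := s.toList ++ s.toList
  pvALoop ss n a b vis 0 s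

-- ===== PORT B =====
-- cand = ''.join(str((int(c) + (o if p % 2 else e)) % 10) for p, c in enumerate(base))
def pvBCand (base : List Char) (o e : Int) : String :=
  PySem.Str.join "" ((PySem.List.enumerate base).map (fun pc =>
    PySem.Int.toStr (PySem.Int.mod ((PySem.Int.ofStr? (String.ofList [pc.2])).getD 0 +
      (if PySem.Int.mod pc.1 2 = 0 then e else o)) 10)))

def findLexSmallestString_alt (s : String) (a : Int) (b : Int) : String :=
  let n := s.toList.length
  let g : Nat := Int.gcd b (n : Int)
  let d : Nat := Int.gcd a 10
  let odds := PySem.List.pyRange 0 10 (d : Int)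
  let evens := if PySem.Int.mod b 2 = 0 then [(0 : Int)] else PySem.List.pyRange 0 10 (d : Int)
  let best := (PySem.List.pyRange 0 (n : Int) (g : Int)).foldl (fun best r =>
      let base := PySem.List.slice s.toList (some r) none ++ PySem.List.slice s.toList none (some r)
      odds.foldl (fun best o =>
        evens.foldl (fun best e =>
          let cand := pvBCand base o e
          match best with
          | none => some cand
          | some x => if cand < x then some cand else some x) best) best) (none : Option String)
  best.getD ""

-- ===== PRECONDITION & SPEC =====
-- Pre_ excludes exactly the inputs on which Python A raises: the empty string
-- (IndexError on vis[0]) and strings with a non-digit character (ValueError in int(tmp[p])).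
def Pre_findLexSmallestString (s : String) (a : Int) (b : Int) : Prop :=
  s.toList ≠ [] ∧ s.toList.all PySem.Chars.isdigit = true
instance (s : String) (a : Int) (b : Int) : Decidable (Pre_findLexSmallestString s a b) := by
  unfold Pre_findLexSmallestString; infer_instance

def pvWitness_findLexSmallestString : String × Int × Int := ("5525", 9, 2)

def Spec_findLexSmallestString (s : String) (a : Int) (b : Int) (out : String) : Prop := out = findLexSmallestString_alt s a b
instance (s : String) (a : Int) (b : Int) (out : String) : Decidable (Spec_findLexSmallestString s a b out) := by unfold Spec_findLexSmallestString; infer_instance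

-- ===== CLAIM (what is proved, stated in full; the proofs are below) =====
def Claim_equal_findLexSmallestString : Prop := ∀ (s : String) (a : Int) (b : Int), Dom_findLexSmallestString s a b → Pre_findLexSmallestString s a b → Spec_findLexSmallestString s a b (findLexSmallestString s a b)

-- ===== LEMMAS AND PROOFS =====

def pvMin (init : String) (L : List String) : String :=
  L.foldl (fun acc t => if t < acc then t else acc) init

theorem pvMin_le_init (init : String) (L : List String) : pvMin init L ≤ init := by
  induction L generalizing init with
  | nil => exact le_refl _
  | cons x L ih =>
    refine le_trans (ih (if x < init then x else init)) ?_
    split_ifs with h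
    · exact le_of_lt h
    · exact le_refl _

theorem pvMin_le_mem (init : String) (L : List String) : ∀ x ∈ L, pvMin init L ≤ x := by
  induction L generalizing init with
  | nil => intro x hx; cases hx
  | cons y L ih =>
    intro x hx
    rcases List.mem_cons.mp hx with h | h
    · subst h
      refine le_trans (pvMin_le_init _ L) ?_
      dsimp only
      split_ifs with h
      · exact le_refl _
      · exact le_of_not_gt h
    · exact ih _ x h

theorem pvMin_mem (init : String) (L : List String) : pvMin init L ∈ init :: L := by
  induction L generalizing init with
  | nil => simp [pvMin]
  | cons y L ih =>
    show pvMin (if y < init then y else init) L ∈ _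
    rcases List.mem_cons.mp (ih (if y < init then y else init)) with h | h
    · split_ifs at h ⊢ with hy
      · rw [h]; simp
      · rw [h]; simp
    · exact List.mem_cons.mpr (Or.inr (List.mem_cons.mpr (Or.inr h)))


theorem pvMin_congr (init init' : String) (L L' : List String)
    (h : ∀ x, x ∈ init :: L ↔ x ∈ init' :: L') : pvMin init L = pvMin init' L' := by
  have h1 : pvMin init' L' ≤ pvMin init L := by
    rcases List.mem_cons.mp ((h _).mp (pvMin_mem init L)) with hm | hm
    · exact hm ▸ pvMin_le_init init' L'
    · exact pvMin_le_mem init' L' _ hm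
  have h2 : pvMin init L ≤ pvMin init' L' := by
    rcases List.mem_cons.mp ((h _).mpr (pvMin_mem init' L')) with hm | hm
    · exact hm ▸ pvMin_le_init init L
    · exact pvMin_le_mem init L _ hm
  exact le_antisymm h2 h1


theorem pvFoldSet {α : Type} (P : List Int) (f : α → α) (d : α) :
    ∀ (t : List α), P.Nodup → (∀ p ∈ P, 0 ≤ p ∧ p.toNat < t.length) →
    P.foldl (fun t p => t.set p.toNat (f (PySem.List.pyGetD t p d))) t
      = t.mapIdx (fun q x => if (q : Int) ∈ P then f x else x) := by
  induction P with
  | nil =>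
    intro t _ _
    simp only [List.foldl_nil, List.not_mem_nil, if_false]
    apply List.ext_getElem
    · simp
    intro q hq1 hq2
    simp
  | cons p P ih =>
    intro t hnd hin
    obtain ⟨hp0, hplt⟩ := hin p List.mem_cons_self
    have hget : PySem.List.pyGetD t p d = t[p.toNat] :=
      PySem.List.pyGetD_eq_getElem t d hp0 (by omega)
    have hpn : p ∉ P := (List.nodup_cons.mp hnd).1
    rw [List.foldl_cons,
        ih (t.set p.toNat (f (PySem.List.pyGetD t p d))) (List.nodup_cons.mp hnd).2
          (fun q hq => ⟨(hin q (List.mem_cons_of_mem _ hq)).1, by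
            simpa using (hin q (List.mem_cons_of_mem _ hq)).2⟩)]
    apply List.ext_getElem
    · simp
    intro q hq1 hq2
    simp only [List.getElem_mapIdx, List.getElem_set, hget]
    by_cases hqp : p.toNat = q
    · have hqi : (q : Int) = p := by omega
      have hnm : (q : Int) ∉ P := by rw [hqi]; exact hpn
      rw [if_neg hnm, if_pos hqp, if_pos (by rw [hqi]; exact List.mem_cons_self)]
      subst hqp
      rfl
    · have hqi : (q : Int) ≠ p := by omega
      rw [if_neg hqp]
      by_cases hmem : (q : Int) ∈ P
      · rw [if_pos hmem, if_pos (List.mem_cons_of_mem _ hmem)]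
      · rw [if_neg hmem, if_neg (by
          intro hc
          rcases List.mem_cons.mp hc with hc | hc
          · exact hqi hc
          · exact hmem hc)]


theorem pvNodupRange2 (a b : Int) : (PySem.List.pyRange a b 2).Nodup := by
  rw [PySem.List.pyRange_of_pos a b (s := 2) (by norm_num)]
  exact List.Nodup.map (fun x y h => by omega) (List.nodup_range)
theorem pvRot (L : List Char) (r : Nat) (hr : r ≤ L.length) :
    ((L ++ L).drop r).take L.length = L.drop r ++ L.take r := by
  rw [List.drop_append, List.take_append]
  have h1 : r - L.length = 0 := by omega
  rw [h1, List.drop_zero]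
  have h2 : (L.drop r).length = L.length - r := by simp
  rw [List.take_of_length_le (by omega), h2]
  have h3 : L.length - (L.length - r) = r := by omega
  rw [h3]

def pvDig (c : Char) : Int := (PySem.Int.ofStr? (String.ofList [c])).getD 0

-- canonical candidate: rotation `base`, odd positions shifted by o, even by e (mod 10)
def pvCanon (base : List Char) (o e : Int) : String :=
  PySem.Str.join "" (base.mapIdx (fun p c =>
    PySem.Int.toStr (PySem.Int.mod (pvDig c + if p % 2 = 0 then e else o) 10)))

theorem pvModAdd (v w : Int) : PySem.Int.mod (v + w) 10 = PySem.Int.mod (v + PySem.Int.mod w 10) 10 := by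
  rw [PySem.Int.mod_eq_emod_of_pos (by norm_num), PySem.Int.mod_eq_emod_of_pos (by norm_num),
      PySem.Int.mod_eq_emod_of_pos (by norm_num)]
  omega

theorem pvPass (P : List Int) (w : Int) (t : List String)
    (hnd : P.Nodup) (hin : ∀ p ∈ P, 0 ≤ p ∧ p.toNat < t.length) :
    P.foldl (fun t p =>
        t.set p.toNat (PySem.Int.toStr (PySem.Int.mod ((PySem.Int.ofStr? (PySem.List.pyGetD t p "")).getD 0 + w) 10))) t
      = t.mapIdx (fun q x => if (q : Int) ∈ P then
          PySem.Int.toStr (PySem.Int.mod ((PySem.Int.ofStr? x).getD 0 + w) 10) else x) :=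
  pvFoldSet P (fun x => PySem.Int.toStr (PySem.Int.mod ((PySem.Int.ofStr? x).getD 0 + w) 10)) "" t hnd hin

theorem pvACand_eq_canon (L : List Char) (a : Int) (r : Nat) (j k : Int) (hr : r ≤ L.length) :
    pvACand (L ++ L) L.length a (r : Int) j k
      = pvCanon (L.drop r ++ L.take r) (PySem.Int.mod (j * a) 10) (PySem.Int.mod (k * a) 10) := by
  have hslice : PySem.List.slice (L ++ L) (some (r : Int)) (some ((r : Int) + (L.length : Int)))
      = L.drop r ++ L.take r := by
    rw [PySem.List.slice_natCast_add (L ++ L) r L.length]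
    exact pvRot L r hr
  have hrotlen : (L.drop r ++ L.take r).length = L.length := by
    simp; omega
  simp only [pvACand, hslice]
  rw [pvPass _ (j * a) _ (pvNodupRange2 _ _) (fun p hp => by
    rw [PySem.List.mem_pyRange_iff_of_pos (by norm_num)] at hp
    constructor
    · omega
    · simp only [List.length_map, hrotlen]; omega)]
  rw [pvPass _ (k * a) _ (pvNodupRange2 _ _) (fun p hp => by
    rw [PySem.List.mem_pyRange_iff_of_pos (by norm_num)] at hp
    constructor
    · omega
    · simp only [List.length_mapIdx, List.length_map, hrotlen]; omega)]
  unfold pvCanon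
  congr 1
  apply List.ext_getElem
  · simp only [List.length_mapIdx, List.length_map, hrotlen]
  intro q hq1 hq2
  have hq : q < L.length := by
    have h := hq1
    simp only [List.length_mapIdx, List.length_map] at h
    rw [hrotlen] at h
    exact h
  simp only [List.getElem_mapIdx, List.getElem_map]
  have hm1 : ((q : Int) ∈ PySem.List.pyRange 1 (L.length : Int) 2) ↔ q % 2 = 1 := by
    rw [PySem.List.mem_pyRange_iff_of_pos (by norm_num)]; omega
  have hm2 : ((q : Int) ∈ PySem.List.pyRange 0 (L.length : Int) 2) ↔ q % 2 = 0 := by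
    rw [PySem.List.mem_pyRange_iff_of_pos (by norm_num)]; omega
  by_cases hpar : q % 2 = 0
  · rw [if_pos (hm2.mpr hpar), if_neg (fun hc => absurd (hm1.mp hc) (by omega)), if_pos hpar]
    show PySem.Int.toStr (PySem.Int.mod (pvDig _ + k * a) 10) = _
    rw [pvModAdd]
  · rw [if_neg (fun hc => absurd (hm2.mp hc) (by omega)), if_pos (hm1.mpr (by omega)),
        if_neg hpar]
    show PySem.Int.toStr (PySem.Int.mod (pvDig _ + j * a) 10) = _
    rw [pvModAdd]

theorem pvBCand_eq_canon (base : List Char) (o e : Int) :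
    pvBCand base o e = pvCanon base o e := by
  unfold pvBCand pvCanon
  congr 1
  apply List.ext_getElem
  · simp
  intro q hq1 hq2
  have hq : q < base.length := by simpa using hq1
  simp only [List.getElem_map, List.getElem_mapIdx,
    PySem.List.getElem_enumerate base 0 q (by simpa [PySem.List.length_enumerate] using hq)]
  have hc : PySem.Int.mod ((0 : Int) + (q : Int)) 2 = 0 ↔ q % 2 = 0 := by
    rw [show ((0 : Int) + (q : Int)) = (q : Int) by ring,
        PySem.Int.mod_eq_emod_of_pos (by norm_num)]
    omega
  by_cases hpar : q % 2 = 0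
  · rw [if_pos (hc.mpr hpar), if_pos hpar]
    rfl
  · rw [if_neg (fun hx => hpar (hc.mp hx)), if_neg hpar]
    rfl

def pvCands (ss : List Char) (n : Nat) (a b : Int) (r : Nat) : List String :=
  (PySem.List.pyRange 0 10 1).flatMap (fun j =>
    (PySem.List.pyRange 0 ((if PySem.Int.mod b 2 = 0 then (0 : Int) else 9) + 1) 1).map (fun k =>
      pvACand ss n a (r : Int) j k))

def pvOrbit (b : Int) (n : Nat) (vis : List Bool) (i : Nat) : List Nat :=
  if PySem.List.pyGetD vis (i : Int) true = false then
    i :: pvOrbit b n (vis.set i true) (PySem.Int.mod ((i : Int) + b) (n : Int)).toNat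
  else []
termination_by vis.count false
decreasing_by exact pvVisDecr vis i (by assumption)

theorem pvALoop_eq_min (ss : List Char) (n : Nat) (a b : Int) :
    ∀ (vis : List Bool) (i : Nat) (ans : String),
    pvALoop ss n a b vis i ans = pvMin ans ((pvOrbit b n vis i).flatMap (pvCands ss n a b)) := by
  suffices H : ∀ (m : Nat) (vis : List Bool) (i : Nat) (ans : String), vis.count false ≤ m →
      pvALoop ss n a b vis i ans = pvMin ans ((pvOrbit b n vis i).flatMap (pvCands ss n a b)) by
    intro vis i ans; exact H (vis.count false) vis i ans le_rfl
  intro m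
  induction m with
  | zero =>
    intro vis i ans h0
    have hv : ¬ PySem.List.pyGetD vis (i : Int) true = false := by
      intro hv
      exact absurd (Nat.lt_of_lt_of_le (pvVisDecr vis i hv) h0) (by omega)
    rw [pvALoop, pvOrbit, dif_neg hv, if_neg hv]
    rfl
  | succ m ih =>
    intro vis i ans h
    by_cases hv : PySem.List.pyGetD vis (i : Int) true = false
    · rw [pvALoop, pvOrbit, dif_pos hv, if_pos hv]
      rw [List.flatMap_cons, pvMin, List.foldl_append, ← pvMin, ← pvMin,
          ih _ _ _ (by have := pvVisDecr vis i hv; omega)]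
      congr 1
      simp only [pvMin, pvCands, List.foldl_flatMap, List.foldl_map]
    · rw [pvALoop, pvOrbit, dif_neg hv, if_neg hv]
      rfl

theorem pvOrbit_sub (b : Int) (n : Nat) :
    ∀ (m : Nat) (vis : List Bool) (i : Nat), vis.count false ≤ m → i < n → (Int.gcd b (n : Int) : Int) ∣ (i : Int) →
    ∀ r ∈ pvOrbit b n vis i, r < n ∧ (Int.gcd b (n : Int) : Int) ∣ (r : Int) := by
  intro m
  induction m with
  | zero =>
    intro vis i h0 hi hd r hr
    have hv : ¬ PySem.List.pyGetD vis (i : Int) true = false := by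
      intro hv; exact absurd (Nat.lt_of_lt_of_le (pvVisDecr vis i hv) h0) (by omega)
    rw [pvOrbit, if_neg hv] at hr
    cases hr
  | succ m ih =>
    intro vis i h hi hd r hr
    by_cases hv : PySem.List.pyGetD vis (i : Int) true = false
    · rw [pvOrbit, if_pos hv] at hr
      rcases List.mem_cons.mp hr with hr | hr
      · exact hr ▸ ⟨hi, hd⟩
      · have hn : 0 < n := by omega
        have hnext1 : (PySem.Int.mod ((i : Int) + b) (n : Int)).toNat < n := by
          have h1 := PySem.Int.mod_lt ((i : Int) + b) (b := (n : Int)) (by exact_mod_cast hn)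
          have h2 := PySem.Int.mod_nonneg ((i : Int) + b) (b := (n : Int)) (by exact_mod_cast hn)
          omega
        have hnext2 : (Int.gcd b (n : Int) : Int) ∣ ((PySem.Int.mod ((i : Int) + b) (n : Int)).toNat : Int) := by
          have h2 := PySem.Int.mod_nonneg ((i : Int) + b) (b := (n : Int)) (by exact_mod_cast (by omega : 0 < n))
          rw [Int.toNat_of_nonneg h2, PySem.Int.mod_eq_emod_of_pos (by exact_mod_cast (by omega : 0 < n)), Int.emod_def]
          have hdb : (Int.gcd b (n : Int) : Int) ∣ b := Int.gcd_dvd_left b (n : Int)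
          have hdn : (Int.gcd b (n : Int) : Int) ∣ (n : Int) := Int.gcd_dvd_right b (n : Int)
          exact Dvd.dvd.sub (Dvd.dvd.add hd hdb) (Dvd.dvd.mul_right hdn _)
        exact ih _ _ (by have := pvVisDecr vis i hv; omega) hnext1 hnext2 r hr
    · rw [pvOrbit, if_neg hv] at hr
      cases hr
-- closure: the visited set absorbs one more step
theorem pvTvSet (vis : List Bool) (i q : Nat)
    (h : PySem.List.pyGetD (vis.set i true) (q : Int) true = true) :
    q = i ∨ PySem.List.pyGetD vis (q : Int) true = true := by
  by_cases hqi : q = i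
  · exact Or.inl hqi
  · right
    rw [PySem.List.pyGetD_natCast] at h ⊢
    rwa [List.getD_eq_getElem?_getD, List.getElem?_set_ne (by omega), ← List.getD_eq_getElem?_getD] at h
theorem pvOrbit_closure (b : Int) (n : Nat) :
    ∀ (m : Nat) (vis : List Bool) (i : Nat), vis.count false ≤ m →
    (PySem.List.pyGetD vis (i : Int) true = true ∨ i ∈ pvOrbit b n vis i) ∧
    (∀ x ∈ pvOrbit b n vis i,
      PySem.List.pyGetD vis (((PySem.Int.mod ((x : Int) + b) (n : Int)).toNat : Nat) : Int) true = true
      ∨ (PySem.Int.mod ((x : Int) + b) (n : Int)).toNat ∈ pvOrbit b n vis i) := by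
  intro m
  induction m with
  | zero =>
    intro vis i h0
    have hv : ¬ PySem.List.pyGetD vis (i : Int) true = false := by
      intro hv; exact absurd (Nat.lt_of_lt_of_le (pvVisDecr vis i hv) h0) (by omega)
    rw [pvOrbit, if_neg hv]
    exact ⟨Or.inl (by revert hv; cases PySem.List.pyGetD vis (i : Int) true <;> simp), by simp⟩
  | succ m ih =>
    intro vis i h
    by_cases hv : PySem.List.pyGetD vis (i : Int) true = false
    · obtain ⟨iha, ihb⟩ := ih (vis.set i true) (PySem.Int.mod ((i : Int) + b) (n : Int)).toNat
        (by have := pvVisDecr vis i hv; omega)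
      rw [pvOrbit, if_pos hv]
      constructor
      · exact Or.inr List.mem_cons_self
      · intro x hx
        rcases List.mem_cons.mp hx with hx | hx
        · subst hx
          rcases iha with hh | hh
          · rcases pvTvSet vis x _ hh with he | he
            · exact Or.inr (by rw [he]; exact List.mem_cons_self)
            · exact Or.inl he
          · exact Or.inr (List.mem_cons_of_mem _ hh)
        · rcases ihb x hx with hh | hh
          · rcases pvTvSet vis i _ hh with he | he
            · exact Or.inr (by rw [he]; exact List.mem_cons_self)
            · exact Or.inl he
          · exact Or.inr (List.mem_cons_of_mem _ hh)
    · rw [pvOrbit, if_neg hv]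
      refine ⟨Or.inl (by revert hv; cases PySem.List.pyGetD vis (i : Int) true <;> simp), by simp⟩

theorem pvTv0 (n q : Nat) (hq : q < n) :
    PySem.List.pyGetD (List.replicate n false) (q : Int) true = false := by
  rw [PySem.List.pyGetD_natCast, List.getD_eq_getElem?_getD,
      List.getElem?_eq_getElem (by simpa using hq)]
  simp

theorem pvHit (b : Int) (n : Nat) (hn : 0 < n) (r : Nat) (hr : r < n)
    (hd : (Int.gcd b (n : Int) : Int) ∣ (r : Int)) :
    ∃ t : Nat, (PySem.Int.mod ((t : Int) * b) (n : Int)).toNat = r := by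
  obtain ⟨c, hc⟩ := hd
  have hb := Int.gcd_eq_gcd_ab b (n : Int)
  set t0 : Int := c * Int.gcdA b (n : Int) with ht0
  have hnpos : (0 : Int) < (n : Int) := by exact_mod_cast hn
  refine ⟨(t0 % (n : Int)).toNat, ?_⟩
  rw [PySem.Int.mod_eq_emod_of_pos hnpos,
      Int.toNat_of_nonneg (Int.emod_nonneg t0 (by omega))]
  have h1 : (t0 % (n : Int)) * b % (n : Int) = t0 * b % (n : Int) := by
    rw [Int.mul_emod, Int.emod_emod_of_dvd _ dvd_rfl, ← Int.mul_emod]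
  rw [h1]
  have h2 : t0 * b = (r : Int) - (n : Int) * (c * Int.gcdB b (n : Int)) := by
    have : t0 * b = c * (b * Int.gcdA b (n : Int)) := by ring
    rw [this]
    have hba : b * Int.gcdA b (n : Int) = (Int.gcd b (n : Int) : Int) - (n : Int) * Int.gcdB b (n : Int) := by
      omega
    rw [hba, hc]
    ring
  rw [h2]
  have h3 : ((r : Int) - (n : Int) * (c * Int.gcdB b (n : Int))) % (n : Int) = (r : Int) % (n : Int) := by
    rw [Int.sub_emod, Int.mul_emod_right]
    simp [Int.emod_emod_of_dvd]
  rw [h3, Int.emod_eq_of_lt (by omega) (by omega)]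
  omega

theorem pvOrbit_mem (b : Int) (n : Nat) (hn : 0 < n) (r : Nat) (hr : r < n)
    (hd : (Int.gcd b (n : Int) : Int) ∣ (r : Int)) :
    r ∈ pvOrbit b n (List.replicate n false) 0 := by
  have hnpos : (0 : Int) < (n : Int) := by exact_mod_cast hn
  obtain ⟨hcl0, hclstep⟩ := pvOrbit_closure b n ((List.replicate n false).count false)
      (List.replicate n false) 0 le_rfl
  have h0 : 0 ∈ pvOrbit b n (List.replicate n false) 0 := by
    rcases hcl0 with hh | hh
    · rw [pvTv0 n 0 hn] at hh; cases hh
    · exact hh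
  have hstep : ∀ x ∈ pvOrbit b n (List.replicate n false) 0,
      (PySem.Int.mod ((x : Int) + b) (n : Int)).toNat ∈ pvOrbit b n (List.replicate n false) 0 := by
    intro x hx
    rcases hclstep x hx with hh | hh
    · have hlt : (PySem.Int.mod ((x : Int) + b) (n : Int)).toNat < n := by
        have h1 := PySem.Int.mod_lt ((x : Int) + b) hnpos
        have h2 := PySem.Int.mod_nonneg ((x : Int) + b) hnpos
        omega
      rw [pvTv0 n _ hlt] at hh; cases hh
    · exact hh
  have hall : ∀ t : Nat, (PySem.Int.mod ((t : Int) * b) (n : Int)).toNat ∈ pvOrbit b n (List.replicate n false) 0 := by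
    intro t
    induction t with
    | zero =>
      have : (PySem.Int.mod ((0 : Int) * b) (n : Int)).toNat = 0 := by
        rw [PySem.Int.mod_eq_emod_of_pos hnpos]
        norm_num
      rw [show ((0 : Nat) : Int) = (0 : Int) by norm_num, this]
      exact h0
    | succ t ih =>
      have hx := hstep _ ih
      have harith : (PySem.Int.mod (((PySem.Int.mod ((t : Int) * b) (n : Int)).toNat : Int) + b) (n : Int)).toNat
          = (PySem.Int.mod (((t + 1 : Nat) : Int) * b) (n : Int)).toNat := by
        rw [PySem.Int.mod_eq_emod_of_pos hnpos, PySem.Int.mod_eq_emod_of_pos hnpos,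
            PySem.Int.mod_eq_emod_of_pos hnpos,
            Int.toNat_of_nonneg (Int.emod_nonneg _ (by omega))]
        have : ((t : Int) * b % (n : Int) + b) % (n : Int) = ((t : Int) * b + b) % (n : Int) := by
          rw [Int.add_emod ((t : Int) * b % (n : Int)) b, Int.emod_emod_of_dvd _ dvd_rfl, ← Int.add_emod]
        rw [this]
        congr 2
        push_cast
        ring
      rw [← harith]
      exact hx
  obtain ⟨t, ht⟩ := pvHit b n hn r hr hd
  exact ht ▸ hall t


-- offsets {j*a % 10 : j<10} = multiples of gcd(a,10) in [0,10)
theorem pvOffs_mem (a : Int) (x : Int) :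
    (x ∈ (PySem.List.pyRange 0 10 1).map (fun j => PySem.Int.mod (j * a) 10))
      ↔ x ∈ PySem.List.pyRange 0 10 ((Int.gcd a 10 : Nat) : Int) := by
  have hmodeq : ∀ j : Int, PySem.Int.mod (j * a) 10 = PySem.Int.mod (j * (a % 10)) 10 := by
    intro j
    rw [PySem.Int.mod_eq_emod_of_pos (by norm_num), PySem.Int.mod_eq_emod_of_pos (by norm_num),
        Int.mul_emod j a 10, Int.mul_emod j (a % 10) 10, Int.emod_emod_of_dvd a dvd_rfl]
  have hg : Int.gcd a 10 = Int.gcd (a % 10) 10 := by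
    rw [Int.emod_def, Int.mul_comm]
    exact (Int.gcd_sub_mul_right_left 10 a (a / 10)).symm
  have hb1 : 0 ≤ a % 10 := Int.emod_nonneg a (by norm_num)
  have hb2 : a % 10 < 10 := Int.emod_lt_of_pos a (by norm_num)
  have key : ∀ (a' : Int), 0 ≤ a' → a' < 10 →
      (∀ y ∈ (PySem.List.pyRange 0 10 1).map (fun j => PySem.Int.mod (j * a') 10),
        y ∈ PySem.List.pyRange 0 10 ((Int.gcd a' 10 : Nat) : Int)) ∧
      (∀ y ∈ PySem.List.pyRange 0 10 ((Int.gcd a' 10 : Nat) : Int),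
        y ∈ (PySem.List.pyRange 0 10 1).map (fun j => PySem.Int.mod (j * a') 10)) := by
    intro a' h1 h2
    interval_cases a' <;> exact ⟨by decide, by decide⟩
  obtain ⟨k1, k2⟩ := key (a % 10) hb1 hb2
  constructor
  · intro hx
    rw [hg]
    apply k1
    rcases List.mem_map.mp hx with ⟨j, hj, hjx⟩
    exact List.mem_map.mpr ⟨j, hj, by rw [← hmodeq j]; exact hjx⟩
  · intro hx
    rw [hg] at hx
    rcases List.mem_map.mp (k2 x hx) with ⟨j, hj, hjx⟩
    exact List.mem_map.mpr ⟨j, hj, by rw [hmodeq j]; exact hjx⟩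

theorem pvDigitChars (c : Char) (h : PySem.Chars.isdigit c = true) :
    c ∈ ['0', '1', '2', '3', '4', '5', '6', '7', '8', '9'] := by
  simp only [PySem.Chars.isdigit, Bool.and_eq_true, decide_eq_true_eq, Char.le_def,
    UInt32.le_iff_toNat_le] at h
  have h1 : 48 ≤ c.toNat := h.1
  have h2 : c.toNat ≤ 57 := h.2
  have hd : c.toNat = 48 ∨ c.toNat = 49 ∨ c.toNat = 50 ∨ c.toNat = 51 ∨ c.toNat = 52 ∨
      c.toNat = 53 ∨ c.toNat = 54 ∨ c.toNat = 55 ∨ c.toNat = 56 ∨ c.toNat = 57 := by omega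
  rcases hd with h'|h'|h'|h'|h'|h'|h'|h'|h'|h' <;> rw [← Char.ofNat_toNat c, h'] <;> decide
theorem pvDigitSingle (c : Char) (h : PySem.Chars.isdigit c = true) :
    (PySem.Int.toStr (PySem.Int.mod (pvDig c + 0) 10)).toList = [c] := by
  have := pvDigitChars c h
  fin_cases this <;> decide
theorem pvCanon_id (L : List Char) (hdig : L.all PySem.Chars.isdigit = true) :
    pvCanon L 0 0 = String.ofList L := by
  unfold pvCanon
  rw [← String.toList_inj, PySem.Str.toList_join]
  have hmap : (L.mapIdx (fun p c =>
      PySem.Int.toStr (PySem.Int.mod (pvDig c + if p % 2 = 0 then (0:Int) else 0) 10))).map String.toList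
      = L.map (fun c => [c]) := by
    apply List.ext_getElem
    · simp
    intro q hq1 hq2
    have hq : q < L.length := by simpa using hq2
    simp only [List.getElem_map, List.getElem_mapIdx, ite_self]
    exact pvDigitSingle L[q] (by
      have := List.all_eq_true.mp hdig L[q] (List.getElem_mem hq)
      exact this)
  rw [hmap]
  have : String.toList "" = [] := rfl
  rw [this, PySem.Chars.join_nil_singletons]
  simp


def pvStep (best : Option String) (t : String) : Option String :=
  match best with
  | none => some t
  | some x => if t < x then some t else some x
def pvBase (L : List Char) (r : Int) : List Char :=
  PySem.List.slice L (some r) none ++ PySem.List.slice L none (some r)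
def pvLB (L : List Char) (a b : Int) : List String :=
  (PySem.List.pyRange 0 (L.length : Int) ((Int.gcd b (L.length : Int) : Nat) : Int)).flatMap (fun r =>
    (PySem.List.pyRange 0 10 ((Int.gcd a 10 : Nat) : Int)).flatMap (fun o =>
      (if PySem.Int.mod b 2 = 0 then [(0 : Int)] else PySem.List.pyRange 0 10 ((Int.gcd a 10 : Nat) : Int)).map (fun e =>
        pvBCand (pvBase L r) o e)))
theorem pvAlt_eq (s : String) (a b : Int) :
    findLexSmallestString_alt s a b = ((pvLB s.toList a b).foldl pvStep none).getD "" := by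
  simp only [findLexSmallestString_alt, pvLB, pvBase, List.foldl_flatMap, List.foldl_map]
  rfl
theorem pvFoldOpt (L : List String) (c : String) : L.foldl pvStep (some c) = some (pvMin c L) := by
  induction L generalizing c with
  | nil => rfl
  | cons t L ih =>
    rw [List.foldl_cons,
        show pvStep (some c) t = some (if t < c then t else c) by
          by_cases h : t < c <;> simp [pvStep, h],
        ih]
    rfl

theorem pvMain (s : String) (a b : Int) (hne : s.toList ≠ [])
    (hdig : s.toList.all PySem.Chars.isdigit = true) :
    findLexSmallestString s a b = findLexSmallestString_alt s a b := by
  have hn : 0 < s.toList.length := List.length_pos_iff.mpr hne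
  have hnpos : (0 : Int) < (s.toList.length : Int) := by exact_mod_cast hn
  have hgpos : 0 < Int.gcd b (s.toList.length : Int) := by
    rcases Nat.eq_zero_or_pos (Int.gcd b (s.toList.length : Int)) with h | h
    · have := Int.gcd_eq_zero_iff.mp h
      omega
    · exact h
  have hdpos : 0 < Int.gcd a (10 : Int) := by
    rcases Nat.eq_zero_or_pos (Int.gcd a (10 : Int)) with h | h
    · have := Int.gcd_eq_zero_iff.mp h
      omega
    · exact h
  have hgposI : (0 : Int) < ((Int.gcd b (s.toList.length : Int) : Nat) : Int) := by exact_mod_cast hgpos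
  have hdposI : (0 : Int) < ((Int.gcd a (10 : Int) : Nat) : Int) := by exact_mod_cast hdpos
  have hA : findLexSmallestString s a b
      = pvMin s ((pvOrbit b s.toList.length (List.replicate s.toList.length false) 0).flatMap
          (pvCands (s.toList ++ s.toList) s.toList.length a b)) := by
    simp only [findLexSmallestString]
    rw [pvALoop_eq_min]
  have hVsub : ∀ r ∈ pvOrbit b s.toList.length (List.replicate s.toList.length false) 0,
      r < s.toList.length ∧ (Int.gcd b (s.toList.length : Int) : Int) ∣ (r : Int) :=
    pvOrbit_sub b s.toList.length ((List.replicate s.toList.length false).count false) (List.replicate s.toList.length false) 0 le_rfl hn (by simp)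
  have hrot : ∀ (r : Nat), pvBase s.toList (r : Int) = s.toList.drop r ++ s.toList.take r := by
    intro r
    unfold pvBase
    rw [PySem.List.slice_from s.toList (Int.natCast_nonneg r),
        PySem.List.slice_to s.toList (Int.natCast_nonneg r), Int.toNat_natCast]
  -- membership transfer
  have hmem : ∀ x, x ∈ s :: ((pvOrbit b s.toList.length (List.replicate s.toList.length false) 0).flatMap
      (pvCands (s.toList ++ s.toList) s.toList.length a b)) ↔ x ∈ pvLB s.toList a b := by
    intro x
    constructor
    · intro hx
      rcases List.mem_cons.mp hx with hx | hx
      · -- x = s : the identity candidate r=0, o=0, e=0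
        unfold pvLB
        refine List.mem_flatMap.mpr ⟨0, ?_, ?_⟩
        · rw [PySem.List.mem_pyRange_iff_of_pos hgposI]
          exact ⟨le_refl _, by omega, by simp⟩
        · refine List.mem_flatMap.mpr ⟨0, ?_, ?_⟩
          · rw [PySem.List.mem_pyRange_iff_of_pos hdposI]
            exact ⟨le_refl _, by omega, by simp⟩
          · have h0 : (0 : Int) ∈ (if PySem.Int.mod b 2 = 0 then [(0 : Int)]
                else PySem.List.pyRange 0 10 ((Int.gcd a (10 : Int) : Nat) : Int)) := by
              split_ifs
              · exact List.mem_singleton.mpr rfl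
              · rw [PySem.List.mem_pyRange_iff_of_pos hdposI]
                exact ⟨le_refl _, by omega, by simp⟩
            refine List.mem_map.mpr ⟨0, h0, ?_⟩
            rw [pvBCand_eq_canon]
            have h00 := hrot 0
            rw [Nat.cast_zero] at h00
            rw [h00]
            simp only [List.drop_zero, List.take_zero, List.append_nil]
            rw [pvCanon_id s.toList hdig, hx]
            simp
      · -- x a candidate of A
        rcases List.mem_flatMap.mp hx with ⟨r, hrV, hxc⟩
        obtain ⟨hr1, hr2⟩ := hVsub r hrV
        rcases List.mem_flatMap.mp hxc with ⟨j, hj, hxm⟩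
        rcases List.mem_map.mp hxm with ⟨k, hk, hxe⟩
        rw [pvACand_eq_canon s.toList a r j k (le_of_lt hr1)] at hxe
        unfold pvLB
        refine List.mem_flatMap.mpr ⟨(r : Int), ?_, ?_⟩
        · rw [PySem.List.mem_pyRange_iff_of_pos hgposI]
          exact ⟨by omega, by omega, by simpa using hr2⟩
        · refine List.mem_flatMap.mpr ⟨PySem.Int.mod (j * a) 10, ?_, ?_⟩
          · exact (pvOffs_mem a _).mp (List.mem_map.mpr ⟨j, hj, rfl⟩)
          · refine List.mem_map.mpr ⟨PySem.Int.mod (k * a) 10, ?_, ?_⟩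
            · by_cases hb : PySem.Int.mod b 2 = 0
              · rw [if_pos hb]
                rw [if_pos hb] at hk
                have hk0 : k = 0 := by
                  rw [show (0 : Int) + 1 = 1 by norm_num, PySem.List.mem_pyRange_one] at hk
                  omega
                subst hk0
                simp only [zero_mul]
                have : PySem.Int.mod 0 10 = 0 := by decide
                rw [this]
                exact List.mem_singleton.mpr rfl
              · rw [if_neg hb]
                rw [if_neg hb] at hk
                have : ((9 : Int) + 1) = 10 := by norm_num
                rw [this] at hk
                exact (pvOffs_mem a _).mp (List.mem_map.mpr ⟨k, hk, rfl⟩)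
            · rw [pvBCand_eq_canon, hrot r]
              exact hxe
    · intro hx
      unfold pvLB at hx
      rcases List.mem_flatMap.mp hx with ⟨rI, hrI, hxc⟩
      rw [PySem.List.mem_pyRange_iff_of_pos hgposI] at hrI
      obtain ⟨hrI0, hrIn, hrId⟩ := hrI
      rcases List.mem_flatMap.mp hxc with ⟨o, ho, hxm⟩
      rcases List.mem_map.mp hxm with ⟨e, he, hxe⟩
      refine List.mem_cons.mpr (Or.inr ?_)
      have hrV : rI.toNat ∈ pvOrbit b s.toList.length (List.replicate s.toList.length false) 0 := by
        apply pvOrbit_mem b s.toList.length hn rI.toNat (by omega)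
        rw [Int.toNat_of_nonneg hrI0]
        simpa using hrId
      refine List.mem_flatMap.mpr ⟨rI.toNat, hrV, ?_⟩
      rcases List.mem_map.mp ((pvOffs_mem a o).mpr ho) with ⟨j, hj, hjo⟩
      -- pick k for the even offset
      have hkex : ∃ k ∈ PySem.List.pyRange 0 ((if PySem.Int.mod b 2 = 0 then (0 : Int) else 9) + 1) 1,
          PySem.Int.mod (k * a) 10 = e := by
        by_cases hb : PySem.Int.mod b 2 = 0
        · rw [if_pos hb] at he ⊢
          have he0 : e = 0 := List.mem_singleton.mp he
          refine ⟨0, ?_, ?_⟩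
          · rw [show (0 : Int) + 1 = 1 by norm_num, PySem.List.mem_pyRange_one]
            omega
          · rw [he0]
            simp only [zero_mul]
            decide
        · rw [if_neg hb] at he ⊢
          rcases List.mem_map.mp ((pvOffs_mem a e).mpr he) with ⟨k, hk, hke⟩
          refine ⟨k, ?_, hke⟩
          rw [show (9 : Int) + 1 = 10 by norm_num]
          exact hk
      rcases hkex with ⟨k, hk, hke⟩
      refine List.mem_flatMap.mpr ⟨j, hj, ?_⟩
      refine List.mem_map.mpr ⟨k, hk, ?_⟩
      rw [pvACand_eq_canon s.toList a rI.toNat j k (by omega), hjo, hke,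
          ← hrot rI.toNat, ← hxe, pvBCand_eq_canon]
      congr 2
      omega
  have hsLB : s ∈ pvLB s.toList a b := (hmem s).mp List.mem_cons_self
  obtain ⟨c, rest, hLB⟩ : ∃ c rest, pvLB s.toList a b = c :: rest := by
    cases h : pvLB s.toList a b with
    | nil => rw [h] at hsLB; cases hsLB
    | cons c rest => exact ⟨c, rest, rfl⟩
  rw [hA, pvAlt_eq, hLB, List.foldl_cons]
  have : pvStep none c = some c := rfl
  rw [this, pvFoldOpt]
  simp only [Option.getD_some]
  exact pvMin_congr s c _ rest (fun x => (hmem x).trans (by rw [hLB]))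


-- ===== VERDICT (by name: the statement is the Claim_ definition above) =====
theorem findLexSmallestString_spec : Claim_equal_findLexSmallestString := by
  intro s a b hdom hpre
  unfold Spec_findLexSmallestString
  exact pvMain s a b hpre.1 hpre.2
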